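-- pv_equiv track=rewrite | github.com/xiejunbiao/cloudbrain-recommend | offline_com/foryou_offline_com/utils/basic_handles.py | resort_by_multiple
-- ===== SOURCE A (Python) =====
-- def resort_by_multiple(a_dict, b_list):
--     """
--     方法用于按蛇形顺序依次从a_dict取出元素重新排序
--     输入：字典a_dict的键值为list,b_list中每个元素为该list长度
--     输出：重新排序后的list
--     功能：用于将a_dict转化成一个蛇形排序的list
--     """
--     all_sorted_list = []
--     for i in range(max(b_list)):
--         for cate in a_dict.keys():
--             try:
--                 all_sorted_list.append(a_dict.get(cate)[i])
--             except IndexError: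
--                 continue
--     return all_sorted_list
-- ===== SOURCE B (Python) =====
-- def resort_by_multiple(a_dict, b_list):
--     """Row-major distribution: walk each value list once, dropping its elements
--     into per-row buckets (one bucket per output row), then flatten the buckets."""
--     m = max(b_list)
--     buckets = [[] for _ in range(m)]
--     for v in a_dict.values():
--         for i, x in enumerate(v):
--             if i >= m:
--                 break
--             buckets[i].append(x)
--     return [x for b in buckets for x in b]
-- ===== Notes on version B (the rewrite author's own statement) =====
-- stated objective: faster
-- what changed: A scans every key for each row index and catches IndexError per element (column-major probing); B traverses each value list exactly once in row-major order, distributing elements into per-row buckets (capped at max(b_list)) and flattening the buckets at the end.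
import Mathlib
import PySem

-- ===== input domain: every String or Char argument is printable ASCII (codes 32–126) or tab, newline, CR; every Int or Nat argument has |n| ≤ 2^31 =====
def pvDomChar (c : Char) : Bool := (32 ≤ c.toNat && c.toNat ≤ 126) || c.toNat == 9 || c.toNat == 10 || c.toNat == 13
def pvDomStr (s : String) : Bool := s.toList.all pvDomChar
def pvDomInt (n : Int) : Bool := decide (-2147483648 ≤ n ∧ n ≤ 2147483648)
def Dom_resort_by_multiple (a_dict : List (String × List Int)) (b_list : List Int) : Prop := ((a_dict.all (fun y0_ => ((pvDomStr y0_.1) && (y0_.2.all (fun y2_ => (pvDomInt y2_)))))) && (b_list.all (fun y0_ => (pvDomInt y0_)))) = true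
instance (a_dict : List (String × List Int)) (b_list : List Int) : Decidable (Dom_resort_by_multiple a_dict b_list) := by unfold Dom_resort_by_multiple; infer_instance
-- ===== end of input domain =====

-- B replaces A's column-major probing (every key re-scanned per row index, IndexError caught
-- per element) by a single row-major pass distributing each value list into per-row buckets,
-- flattened at the end; objective: faster.

-- ===== PORT A =====
-- A: for i in range(max(b_list)): for cate in a_dict.keys(): try append a_dict.get(cate)[i] except IndexError: continue
def resort_by_multiple (a_dict : List (String × List Int)) (b_list : List Int) : List Int :=
  match PySem.List.max? b_list (fun x => x) with
  | none => []  -- Python raises ValueError here (max of empty); excluded by Pre_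
  | some m =>
    let d := PySem.Dict.ofList a_dict
    (PySem.List.pyRange 0 m 1).foldl (fun acc i =>
      d.keys.foldl (fun acc2 cate =>
        match d.get? cate with
        | none => acc2  -- unreachable: cate comes from d.keys (Python: a_dict.get(cate) is never None)
        | some v =>
          match PySem.List.pyGet? v i with
          | some x => acc2 ++ [x]   -- append succeeds
          | none => acc2            -- IndexError: continue
        ) acc) []

-- ===== PORT B =====
-- inner loop of Source B: 'for i, x in enumerate(v): if i >= m: break; buckets[i].append(x)'
def pvDistrib (m : Int) (buckets : List (List Int)) (i : Nat) (v : List Int) : List (List Int) :=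
  match v with
  | [] => buckets
  | x :: rest =>
    if m ≤ (i : Int) then buckets                                  -- break
    else pvDistrib m (buckets.modify i (fun b => b ++ [x])) (i + 1) rest

-- Source B: m = max(b_list); buckets = [[] for _ in range(m)]; distribute each value list; flatten
def resort_by_multiple_alt (a_dict : List (String × List Int)) (b_list : List Int) : List Int :=
  match PySem.List.max? b_list (fun x => x) with
  | none => []  -- max of empty raises; excluded by Pre_
  | some m =>
    let buckets0 := (PySem.List.pyRange 0 m 1).map (fun _ => ([] : List Int))
    let buckets := (PySem.Dict.ofList a_dict).values.foldl (fun bs v => pvDistrib m bs 0 v) buckets0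
    buckets.flatMap (fun b => b)

-- ===== PRECONDITION & SPEC =====
-- Pre_ excludes only b_list = [], on which Python's max([]) raises ValueError in both A and B.
def Pre_resort_by_multiple (a_dict : List (String × List Int)) (b_list : List Int) : Prop := b_list ≠ []
instance (a_dict : List (String × List Int)) (b_list : List Int) : Decidable (Pre_resort_by_multiple a_dict b_list) := by unfold Pre_resort_by_multiple; infer_instance
def pvWitness_resort_by_multiple : (List (String × List Int)) × List Int :=
  ([("a", [1, 2, 3]), ("b", [4]), ("c", [5, 6])], [3, 1, 2])

def Spec_resort_by_multiple (a_dict : List (String × List Int)) (b_list : List Int) (out : List Int) : Prop := out = resort_by_multiple_alt a_dict b_list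
instance (a_dict : List (String × List Int)) (b_list : List Int) (out : List Int) : Decidable (Spec_resort_by_multiple a_dict b_list out) := by unfold Spec_resort_by_multiple; infer_instance

-- ===== CLAIM (what is proved, stated in full; the proofs are below) =====
def Claim_equal_resort_by_multiple : Prop := ∀ (a_dict : List (String × List Int)) (b_list : List Int), Dom_resort_by_multiple a_dict b_list → Pre_resort_by_multiple a_dict b_list → Spec_resort_by_multiple a_dict b_list (resort_by_multiple a_dict b_list)

-- ===== LEMMAS AND PROOFS =====

-- the common normal form: row i of the snake order, and the rounds i, i+1, …, i+f-1
def pvRow (vals : List (List Int)) (i : Nat) : List Int :=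
  (vals.filter (fun v => decide (i < v.length))).map (fun v => v.getD i 0)

def pvRounds (vals : List (List Int)) (i : Nat) (f : Nat) : List Int :=
  match f with
  | 0 => []
  | f + 1 => pvRow vals i ++ pvRounds vals (i + 1) f

-- ---- A-side: A's loops compute pvRounds ----
theorem pvInnerA_eq (d : PySem.Dict String (List Int)) (i : Nat) :
    ∀ (its : List (String × List Int)) (acc : List Int),
      (∀ p ∈ its, d.get? p.1 = some p.2) →
      (its.map Prod.fst).foldl (fun acc2 cate =>
        match d.get? cate with
        | none => acc2
        | some v =>
          match PySem.List.pyGet? v (i : Int) with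
          | some x => acc2 ++ [x]
          | none => acc2) acc
      = acc ++ pvRow (its.map Prod.snd) i := by
  intro its
  induction its with
  | nil => intro acc _; simp [pvRow]
  | cons p its ih =>
    intro acc hmem
    obtain ⟨k, v⟩ := p
    have hk : d.get? k = some v := hmem (k, v) (List.mem_cons_self ..)
    have htail : ∀ p ∈ its, d.get? p.1 = some p.2 :=
      fun p hp => hmem p (List.mem_cons_of_mem _ hp)
    simp only [List.map_cons, List.foldl_cons, hk]
    rw [PySem.List.pyGet?_natCast]
    by_cases hi : i < v.length
    · have : v[i]? = some v[i] := List.getElem?_eq_getElem hi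
      rw [this]
      unfold pvRow
      rw [List.filter_cons_of_pos (by simpa using hi), ih _ htail]
      simp [pvRow, List.getD_eq_getElem?_getD, this]
    · have : v[i]? = none := List.getElem?_eq_none (by omega)
      rw [this]
      unfold pvRow
      rw [List.filter_cons_of_neg (by simpa using hi), ih _ htail]
      simp [pvRow]

theorem pvOuterA_eq (d : PySem.Dict String (List Int))
    (hits : ∀ p ∈ d.items, d.get? p.1 = some p.2) (m : Int) :
    ∀ (n : Nat) (j : Nat) (acc : List Int), (m - j).toNat = n →
      (PySem.List.pyRange (j : Int) m 1).foldl (fun acc i =>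
        d.keys.foldl (fun acc2 cate =>
          match d.get? cate with
          | none => acc2
          | some v =>
            match PySem.List.pyGet? v i with
            | some x => acc2 ++ [x]
            | none => acc2) acc) acc
      = acc ++ pvRounds d.values j n := by
  intro n
  induction n with
  | zero =>
    intro j acc hn
    have : m ≤ (j : Int) := by omega
    rw [PySem.List.pyRange_one_eq_nil this]
    simp [pvRounds]
  | succ n ih =>
    intro j acc hn
    have hjm : (j : Int) < m := by omega
    rw [PySem.List.pyRange_one_cons hjm, List.foldl_cons]
    have hinner := pvInnerA_eq d j d.items acc hits
    rw [show d.items.map Prod.fst = d.keys from rfl,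
        show d.items.map Prod.snd = d.values from rfl] at hinner
    rw [hinner]
    have hc : (j : Int) + 1 = ((j + 1 : Nat) : Int) := by push_cast; ring
    rw [hc, ih (j + 1) _ (by omega)]
    simp [pvRounds]

-- ---- B-side: the buckets computed by B are exactly the rows ----
theorem get?_pvDistrib (m : Int) :
    ∀ (v : List Int) (i : Nat) (bs : List (List Int)) (j : Nat),
      (pvDistrib m bs i v)[j]? =
        if i ≤ j ∧ j - i < v.length ∧ (j : Int) < m
        then bs[j]?.map (fun b => b ++ [v.getD (j - i) 0])
        else bs[j]? := by
  intro v
  induction v with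
  | nil => intro i bs j; simp [pvDistrib]
  | cons x rest ih =>
    intro i bs j
    rw [pvDistrib]
    by_cases hbrk : m ≤ (i : Int)
    · rw [if_pos hbrk]
      rw [if_neg]
      rintro ⟨h1, _, h3⟩
      have : (i : Int) ≤ (j : Int) := by exact_mod_cast h1
      omega
    · rw [if_neg hbrk, ih (i + 1)]
      by_cases hij : j = i
      · subst hij
        rw [if_neg (by omega), if_pos ⟨le_refl _, by simp, by omega⟩]
        rw [List.getElem?_modify]
        cases bs[j]? <;> simp
      · have hcond : (i + 1 ≤ j ∧ j - (i + 1) < rest.length ∧ (j : Int) < m)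
            ↔ (i ≤ j ∧ j - i < (x :: rest).length ∧ (j : Int) < m) := by
          simp only [List.length_cons]; omega
        rw [List.getElem?_modify]
        have hij' : ¬ i = j := fun h => hij h.symm
        have hmod : (fun a => if i = j then a ++ [x] else a) <$> bs[j]? = bs[j]? := by
          cases bs[j]? <;> simp [hij']
        rw [hmod]
        by_cases hc : i + 1 ≤ j ∧ j - (i + 1) < rest.length ∧ (j : Int) < m
        · rw [if_pos hc, if_pos (hcond.mp hc)]
          have : (x :: rest).getD (j - i) 0 = rest.getD (j - (i + 1)) 0 := by
            have hji : i + 1 ≤ j := hc.1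
            have : j - i = (j - (i + 1)) + 1 := by omega
            rw [this]; rfl
          rw [this]
        · rw [if_neg hc, if_neg (fun h => hc (hcond.mpr h))]

theorem get?_foldl_pvDistrib (m : Int) :
    ∀ (vals : List (List Int)) (bs : List (List Int)) (j : Nat),
      (vals.foldl (fun bs v => pvDistrib m bs 0 v) bs)[j]? =
        if (j : Int) < m then bs[j]?.map (fun b => b ++ pvRow vals j) else bs[j]? := by
  intro vals
  induction vals with
  | nil =>
    intro bs j
    simp only [List.foldl_nil, pvRow, List.filter_nil, List.map_nil]
    split_ifs
    · cases bs[j]? <;> simp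
    · rfl
  | cons v vals ih =>
    intro bs j
    rw [List.foldl_cons, ih, get?_pvDistrib]
    by_cases hjm : (j : Int) < m
    · rw [if_pos hjm]
      by_cases hjv : j < v.length
      · rw [if_pos ⟨Nat.zero_le _, by simpa using hjv, hjm⟩]
        cases bs[j]? with
        | none => simp
        | some b =>
          simp only [Option.map_some]
          have : pvRow (v :: vals) j = v.getD (j - 0) 0 :: pvRow vals j := by
            unfold pvRow
            rw [List.filter_cons_of_pos (by simpa using hjv)]
            simp
          simp [this, hjm]
      · rw [if_neg (by rintro ⟨_, h2, _⟩; simp at h2; omega)]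
        have : pvRow (v :: vals) j = pvRow vals j := by
          unfold pvRow
          rw [List.filter_cons_of_neg (by simpa using hjv)]
        rw [this, if_pos hjm]
    · rw [if_neg hjm, if_neg (by rintro ⟨_, _, h3⟩; exact hjm h3),
          if_neg hjm]

-- B's buckets, as a list, equal the rows 0 .. m.toNat-1
theorem buckets_eq_rows (m : Int) (vals : List (List Int)) :
    vals.foldl (fun bs v => pvDistrib m bs 0 v)
        ((PySem.List.pyRange 0 m 1).map (fun _ => ([] : List Int)))
      = (List.range m.toNat).map (pvRow vals) := by
  apply List.ext_getElem?
  intro j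
  rw [get?_foldl_pvDistrib, List.getElem?_map, List.getElem?_map]
  have hlen : (PySem.List.pyRange 0 m 1).length = m.toNat := by
    rw [PySem.List.length_pyRange_one]; omega
  by_cases hj : j < m.toNat
  · have h1 : (PySem.List.pyRange 0 m 1)[j]? = some (PySem.List.pyRange 0 m 1)[j] :=
      List.getElem?_eq_getElem (by omega)
    have h2 : (List.range m.toNat)[j]? = some j := by
      rw [List.getElem?_range hj]
    rw [if_pos (by omega), h1, h2]
    simp
  · have h1 : (PySem.List.pyRange 0 m 1)[j]? = none := List.getElem?_eq_none (by omega)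
    have h2 : (List.range m.toNat)[j]? = none := List.getElem?_eq_none (by simpa using hj)
    rw [if_neg (by omega), h1, h2]
    rfl

theorem flatMap_rows (vals : List (List Int)) :
    ∀ (f j : Nat), (((List.range' j f).map (pvRow vals)).flatMap (fun b => b)) = pvRounds vals j f := by
  intro f
  induction f with
  | zero => intro j; rfl
  | succ f ih =>
    intro j
    rw [List.range'_succ]
    simp only [List.map_cons, List.flatMap_cons, pvRounds, ih (j + 1)]

-- ===== VERDICT (by name: the statement is the Claim_ definition above) =====
theorem resort_by_multiple_spec : Claim_equal_resort_by_multiple := by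
  intro a_dict b_list _ hpre
  unfold Spec_resort_by_multiple resort_by_multiple resort_by_multiple_alt
  cases hmax : PySem.List.max? b_list (fun x => x) with
  | none => exact absurd ((PySem.List.max?_eq_none_iff b_list _).mp hmax) hpre
  | some m =>
    simp only
    set d := PySem.Dict.ofList a_dict with hd
    have hnd : d.keys.Nodup := PySem.Dict.nodup_keys_ofList a_dict
    have hits : ∀ p ∈ d.items, d.get? p.1 = some p.2 := by
      intro p hp
      obtain ⟨k, v⟩ := p
      exact PySem.Dict.get?_of_mem_items d hp hnd
    have hA := pvOuterA_eq d hits m m.toNat 0 [] (by omega)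
    simp only [Nat.cast_zero] at hA
    rw [hA, buckets_eq_rows m d.values, List.range_eq_range', flatMap_rows d.values m.toNat 0]
    simp
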